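-- pv_equiv track=rewrite | github.com/hashfx/ayurveda-dosha-api | cough_type.py | determine_cough_type
-- ===== SOURCE A (Python) =====
-- def determine_cough_type(symptoms):
--     vata_symptoms = ["dry", "itchy", "light", "irritating"]
--     pitta_symptoms = ["sharp", "burning", "acidic", "bitter"]
--     kapha_symptoms = ["mucus", "heavy", "sticky", "congested"]
--
--     vata_count = 0
--     pitta_count = 0
--     kapha_count = 0
--
--     for symptom in symptoms:
--         if symptom in vata_symptoms:
--             vata_count += 1
--         elif symptom in pitta_symptoms:
--             pitta_count += 1
--         elif symptom in kapha_symptoms: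
--             kapha_count += 1
--
--     if vata_count >= pitta_count and vata_count >= kapha_count:
--         return "vata"
--     elif pitta_count >= vata_count and pitta_count >= kapha_count:
--         return "pitta"
--     else:
--         return "kapha"
-- ===== SOURCE B (Python) =====
-- def determine_cough_type(symptoms):
--     # histogram of the input once, then fold the fixed vocabulary over it
--     hist = {}
--     for s in symptoms:
--         hist[s] = hist.get(s, 0) + 1
--     doshas = {
--         "vata": ["dry", "itchy", "light", "irritating"],
--         "pitta": ["sharp", "burning", "acidic", "bitter"],
--         "kapha": ["mucus", "heavy", "sticky", "congested"],
--     }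
--     return max(doshas, key=lambda d: sum(hist.get(w, 0) for w in doshas[d]))
-- ===== Notes on version B (the rewrite author's own statement) =====
-- stated objective: alternative
-- what changed: Instead of classifying each symptom against three lists and threading three counters through an if/elif cascade, B builds a histogram of the input once, aggregates each dosha's score by summing histogram entries over that dosha's fixed vocabulary, and picks the winner with an ordered argmax whose first-maximal rule reproduces the tie-break.
import Mathlib
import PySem

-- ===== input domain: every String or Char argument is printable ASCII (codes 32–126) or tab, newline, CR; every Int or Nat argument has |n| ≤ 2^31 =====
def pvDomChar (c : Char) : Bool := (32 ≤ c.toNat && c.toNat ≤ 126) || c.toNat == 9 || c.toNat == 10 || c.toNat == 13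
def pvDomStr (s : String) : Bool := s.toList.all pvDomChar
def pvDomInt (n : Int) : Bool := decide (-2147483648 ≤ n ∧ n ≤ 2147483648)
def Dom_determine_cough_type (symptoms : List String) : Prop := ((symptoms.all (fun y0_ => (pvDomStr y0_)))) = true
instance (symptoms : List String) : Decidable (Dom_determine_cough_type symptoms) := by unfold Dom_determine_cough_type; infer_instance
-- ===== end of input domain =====

-- B builds a histogram of the input once and scores each dosha by summing histogram
-- entries over its fixed vocabulary, picking the winner by an ordered argmax (alternative
-- decomposition, same asymptotic cost); A threads three counters through an if/elif cascade.

-- ===== PORT A =====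
def determine_cough_type (symptoms : List String) : String :=
  let vata_symptoms := ["dry", "itchy", "light", "irritating"]
  let pitta_symptoms := ["sharp", "burning", "acidic", "bitter"]
  let kapha_symptoms := ["mucus", "heavy", "sticky", "congested"]
  let c := symptoms.foldl (fun (c : Int × Int × Int) symptom =>
      if symptom ∈ vata_symptoms then (c.1 + 1, c.2.1, c.2.2)
      else if symptom ∈ pitta_symptoms then (c.1, c.2.1 + 1, c.2.2)
      else if symptom ∈ kapha_symptoms then (c.1, c.2.1, c.2.2 + 1)
      else c) (0, 0, 0)
  if c.1 ≥ c.2.1 ∧ c.1 ≥ c.2.2 then "vata"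
  else if c.2.1 ≥ c.1 ∧ c.2.1 ≥ c.2.2 then "pitta"
  else "kapha"

-- ===== PORT B =====
def determine_cough_type_alt (symptoms : List String) : String :=
  let hist : PySem.Dict String Int :=
    symptoms.foldl (fun d s => d.insert s (d.getD s 0 + 1)) PySem.Dict.empty
  let doshas : PySem.Dict String (List String) := PySem.Dict.ofList
    [("vata", ["dry", "itchy", "light", "irritating"]),
     ("pitta", ["sharp", "burning", "acidic", "bitter"]),
     ("kapha", ["mucus", "heavy", "sticky", "congested"])]
  ((PySem.List.max? doshas.keys
      (fun d => ((doshas.getD d []).map (fun w => hist.getD w 0)).sum)).getD "")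

-- ===== PRECONDITION & SPEC =====
def Spec_determine_cough_type (symptoms : List String) (out : String) : Prop := out = determine_cough_type_alt symptoms
instance (symptoms : List String) (out : String) : Decidable (Spec_determine_cough_type symptoms out) := by unfold Spec_determine_cough_type; infer_instance

-- ===== CLAIM (what is proved, stated in full; the proofs are below) =====
def Claim_equal_determine_cough_type : Prop := ∀ (symptoms : List String), Dom_determine_cough_type symptoms → Spec_determine_cough_type symptoms (determine_cough_type symptoms)

-- ===== LEMMAS AND PROOFS =====

-- A's three counters, written as sums of per-word multiplicities of the input list
def pvV (xs : List String) : Int :=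
  (xs.count "dry" : Int) + xs.count "itchy" + xs.count "light" + xs.count "irritating"
def pvP (xs : List String) : Int :=
  (xs.count "sharp" : Int) + xs.count "burning" + xs.count "acidic" + xs.count "bitter"
def pvK (xs : List String) : Int :=
  (xs.count "mucus" : Int) + xs.count "heavy" + xs.count "sticky" + xs.count "congested"

-- A's loop computes exactly those three sums
theorem pvLoopA (symptoms : List String) :
    symptoms.foldl (fun (c : Int × Int × Int) symptom =>
      if symptom ∈ ["dry", "itchy", "light", "irritating"] then (c.1 + 1, c.2.1, c.2.2)
      else if symptom ∈ ["sharp", "burning", "acidic", "bitter"] then (c.1, c.2.1 + 1, c.2.2)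
      else if symptom ∈ ["mucus", "heavy", "sticky", "congested"] then (c.1, c.2.1, c.2.2 + 1)
      else c) (0, 0, 0) = (pvV symptoms, pvP symptoms, pvK symptoms) := by
  suffices h : ∀ (xs : List String) (c : Int × Int × Int),
      xs.foldl (fun (c : Int × Int × Int) symptom =>
        if symptom ∈ ["dry", "itchy", "light", "irritating"] then (c.1 + 1, c.2.1, c.2.2)
        else if symptom ∈ ["sharp", "burning", "acidic", "bitter"] then (c.1, c.2.1 + 1, c.2.2)
        else if symptom ∈ ["mucus", "heavy", "sticky", "congested"] then (c.1, c.2.1, c.2.2 + 1)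
        else c) c = (c.1 + pvV xs, c.2.1 + pvP xs, c.2.2 + pvK xs) by
    rw [h]; simp
  intro xs
  induction xs with
  | nil => intro c; simp [pvV, pvP, pvK]
  | cons s t ih =>
    intro c
    simp only [List.foldl_cons, ih]
    by_cases hv : s ∈ ["dry", "itchy", "light", "irritating"]
    · fin_cases hv <;>
        simp [pvV, pvP, pvK] <;> ring_nf
    · by_cases hp : s ∈ ["sharp", "burning", "acidic", "bitter"]
      · fin_cases hp <;>
          simp_all [pvV, pvP, pvK] <;> ring_nf
      · by_cases hk : s ∈ ["mucus", "heavy", "sticky", "congested"]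
        · fin_cases hk <;>
            simp_all [pvV, pvP, pvK] <;> ring_nf
        · simp only [List.mem_cons, List.not_mem_nil, or_false] at hv hp hk
          push Not at hv hp hk
          have e : ∀ w : String, s ≠ w → ((s :: t).count w : Int) = t.count w := by
            intro w hw
            simp [hw]
          simp only [hv, hp, hk, List.mem_cons, List.not_mem_nil, or_false]
          rw [if_neg (by tauto), if_neg (by tauto), if_neg (by tauto)]
          simp [pvV, pvP, pvK,
            e _ hv.1, e _ hv.2.1, e _ hv.2.2.1, e _ hv.2.2.2,
            e _ hp.1, e _ hp.2.1, e _ hp.2.2.1, e _ hp.2.2.2,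
            e _ hk.1, e _ hk.2.1, e _ hk.2.2.1, e _ hk.2.2.2]

-- B's histogram reads back each word's multiplicity
theorem pvHist (symptoms : List String) (w : String) :
    (symptoms.foldl (fun (d : PySem.Dict String Int) s =>
        d.insert s (d.getD s 0 + 1)) PySem.Dict.empty).getD w 0
      = (symptoms.count w : Int) := by
  rw [PySem.Dict.getD_foldl_insert_add_one]
  simp

-- first-maximal argmax over the three fixed keys, as a comparison chain
theorem pvMax (f : String → Int) :
    (PySem.List.max? ["vata", "pitta", "kapha"] f).getD "" =
    (if f "vata" ≥ f "pitta" ∧ f "vata" ≥ f "kapha" then "vata"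
     else if f "pitta" ≥ f "vata" ∧ f "pitta" ≥ f "kapha" then "pitta"
     else "kapha") := by
  simp only [PySem.List.max?, List.foldl]
  rcases lt_or_ge (f "vata") (f "pitta") with h | h
  · rw [if_pos h]
    repeat' split
    all_goals simp_all
    all_goals omega
  · rw [if_neg (not_lt.mpr h)]
    repeat' split
    all_goals simp_all
    all_goals omega

-- ===== VERDICT (by name: the statement is the Claim_ definition above) =====
theorem determine_cough_type_spec : Claim_equal_determine_cough_type := by
  intro symptoms _
  unfold Spec_determine_cough_type determine_cough_type determine_cough_type_alt
  simp only [pvLoopA]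
  have hk : (PySem.Dict.ofList
      [("vata", ["dry", "itchy", "light", "irritating"]),
       ("pitta", ["sharp", "burning", "acidic", "bitter"]),
       ("kapha", ["mucus", "heavy", "sticky", "congested"])]).keys
      = ["vata", "pitta", "kapha"] := by decide
  rw [hk, pvMax]
  have hv : (PySem.Dict.ofList
      [("vata", ["dry", "itchy", "light", "irritating"]),
       ("pitta", ["sharp", "burning", "acidic", "bitter"]),
       ("kapha", ["mucus", "heavy", "sticky", "congested"])]).getD "vata" [] =
      ["dry", "itchy", "light", "irritating"] := by decide
  have hp : (PySem.Dict.ofList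
      [("vata", ["dry", "itchy", "light", "irritating"]),
       ("pitta", ["sharp", "burning", "acidic", "bitter"]),
       ("kapha", ["mucus", "heavy", "sticky", "congested"])]).getD "pitta" [] =
      ["sharp", "burning", "acidic", "bitter"] := by decide
  have hkk : (PySem.Dict.ofList
      [("vata", ["dry", "itchy", "light", "irritating"]),
       ("pitta", ["sharp", "burning", "acidic", "bitter"]),
       ("kapha", ["mucus", "heavy", "sticky", "congested"])]).getD "kapha" [] =
      ["mucus", "heavy", "sticky", "congested"] := by decide
  rw [hv, hp, hkk]
  simp [pvHist, pvV, pvP, pvK, List.map]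
  ring_nf
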